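-- pv_equiv track=rewrite | github.com/msd7at/MUST-DO-450-DSA | 058 String : Split the binary string into substrings with equal number of 0s and 1s.py | maxSubStr
-- ===== SOURCE A (Python) =====
-- def maxSubStr(str, n):
-- 	count0 = 0
-- 	count1 = 0
-- 	cnt = 0
--
-- 	for i in range(n):
-- 		if str[i] == '0':
-- 			count0 += 1
-- 		else:
-- 			count1 += 1
--
-- 		if count0 == count1:
-- 			cnt += 1
--
-- 	if count0 != count1:
-- 		return -1
--
-- 	return cnt
-- ===== SOURCE B (Python) =====
-- def maxSubStr(str, n):
--     # Greedy chunking: repeatedly strip the shortest balanced prefix; the number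
--     # of chunks is the answer, -1 if a leftover piece has no balanced prefix.
--     cs = [str[i] for i in range(n)]
--     cnt = 0
--     while cs:
--         k = _first_balanced(cs)
--         if k is None:
--             return -1
--         cnt += 1
--         cs = cs[k:]
--     return cnt
--
-- def _first_balanced(cs):
--     # Length of the shortest prefix with equally many '0's and other chars, or None.
--     bal = 0
--     for j, c in enumerate(cs):
--         bal += 1 if c == '0' else -1
--         if bal == 0:
--             return j + 1
--     return None
-- ===== Notes on version B (the rewrite author's own statement) =====
-- stated objective: alternative
-- what changed: B greedily decomposes the prefix into maximal-count balanced chunks: it repeatedly searches for the shortest balanced prefix and slices it off, counting chunks, instead of A's single pass with three running counters testing count0==count1 at every position.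
import Mathlib
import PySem

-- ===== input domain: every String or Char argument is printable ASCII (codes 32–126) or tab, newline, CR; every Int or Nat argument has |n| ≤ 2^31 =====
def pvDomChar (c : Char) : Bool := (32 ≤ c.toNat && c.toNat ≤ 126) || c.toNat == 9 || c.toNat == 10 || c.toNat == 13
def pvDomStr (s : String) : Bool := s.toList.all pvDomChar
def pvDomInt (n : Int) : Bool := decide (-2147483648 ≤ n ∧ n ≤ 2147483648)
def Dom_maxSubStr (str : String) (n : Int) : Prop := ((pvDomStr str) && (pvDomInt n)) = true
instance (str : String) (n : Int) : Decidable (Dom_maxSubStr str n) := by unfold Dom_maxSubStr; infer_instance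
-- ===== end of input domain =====

-- B answers by greedy chunking (repeatedly strip the shortest balanced prefix and count
-- the chunks) instead of A's single pass over three running counters (alternative
-- decomposition, same cost).

-- ===== PORT A =====
-- A's loop body: bump count0/count1 by the character, then bump cnt on a tie.
def maxSubStrStepA (str : String) (acc : Int × Int × Int) (i : Int) : Int × Int × Int :=
  let acc' :=
    if PySem.Str.pyGet? str i = some '0' then (acc.1 + 1, acc.2.1, acc.2.2)
    else (acc.1, acc.2.1 + 1, acc.2.2)
  if acc'.1 = acc'.2.1 then (acc'.1, acc'.2.1, acc'.2.2 + 1) else acc'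

def maxSubStr (str : String) (n : Int) : Int :=
  let st := (PySem.List.pyRange 0 n 1).foldl (maxSubStrStepA str) (0, 0, 0)
  if st.1 ≠ st.2.1 then -1 else st.2.2

-- ===== PORT B =====
-- _first_balanced: length of the shortest prefix with running balance 0, none if absent.
def findBal : List Char → Int → Option Nat
  | [], _ => none
  | c :: t, bal =>
    if bal + (if c = '0' then 1 else -1) = 0 then some 1
    else (findBal t (bal + (if c = '0' then 1 else -1))).map (· + 1)

-- needed by chunkLoop's termination argument
lemma findBal_bounds {cs : List Char} {bal : Int} {k : Nat}
    (h : findBal cs bal = some k) : 1 ≤ k ∧ k ≤ cs.length := by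
  induction cs generalizing bal k with
  | nil => simp [findBal] at h
  | cons c t ih =>
    simp only [findBal] at h
    by_cases hb : bal + (if c = '0' then 1 else -1) = 0
    · rw [if_pos hb] at h; cases h; simp
    · rw [if_neg hb] at h
      cases hf : findBal t (bal + (if c = '0' then 1 else -1)) with
      | none => rw [hf] at h; simp at h
      | some k' =>
        rw [hf] at h
        simp only [Option.map_some, Option.some.injEq] at h
        obtain ⟨h1, h2⟩ := ih hf
        simp only [List.length_cons]
        omega

-- B's while loop: strip the shortest balanced prefix, count it, recurse on the rest.
def chunkLoop (cs : List Char) (cnt : Int) : Int :=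
  if cs = [] then cnt
  else
    match hf : findBal cs 0 with
    | none => -1
    | some k => chunkLoop (cs.drop k) (cnt + 1)
  termination_by cs.length
  decreasing_by
    have hb := findBal_bounds hf
    simp only [List.length_drop]
    omega

def maxSubStr_alt (str : String) (n : Int) : Int :=
  -- [str[i] for i in range(n)]: filterMap is exact under Pre_ (every index in range
  -- succeeds); outside Pre_ both Pythons raise IndexError.
  chunkLoop ((PySem.List.pyRange 0 n 1).filterMap (fun i => PySem.Str.pyGet? str i)) 0

-- ===== PRECONDITION & SPEC =====
-- Pre_ excludes exactly n > len(str), where Python A raises IndexError (B raises there too).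
def Pre_maxSubStr (str : String) (n : Int) : Prop := n ≤ PySem.Str.len str
instance (str : String) (n : Int) : Decidable (Pre_maxSubStr str n) := by unfold Pre_maxSubStr; infer_instance
def pvWitness_maxSubStr : String × Int := ("0110", 4)

def Spec_maxSubStr (str : String) (n : Int) (out : Int) : Prop := out = maxSubStr_alt str n
instance (str : String) (n : Int) (out : Int) : Decidable (Spec_maxSubStr str n out) := by unfold Spec_maxSubStr; infer_instance

-- ===== CLAIM (what is proved, stated in full; the proofs are below) =====
def Claim_equal_maxSubStr : Prop := ∀ (str : String) (n : Int), Dom_maxSubStr str n → Pre_maxSubStr str n → Spec_maxSubStr str n (maxSubStr str n)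

-- ===== LEMMAS AND PROOFS =====

-- A's step expressed on the character it reads.
def stepA' (acc : Int × Int × Int) (c : Char) : Int × Int × Int :=
  let acc' := if c = '0' then (acc.1 + 1, acc.2.1, acc.2.2) else (acc.1, acc.2.1 + 1, acc.2.2)
  if acc'.1 = acc'.2.1 then (acc'.1, acc'.2.1, acc'.2.2 + 1) else acc'

-- The (balance, zero-hit count) abstraction of A's state.
def stepD (acc : Int × Int) (c : Char) : Int × Int :=
  let d := acc.1 + (if c = '0' then 1 else -1)
  (d, if d = 0 then acc.2 + 1 else acc.2)

-- A's fold over indices is a fold over the characters those indices fetch.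
lemma foldA_filterMap (str : String) (l : List Int) (st : Int × Int × Int)
    (h : ∀ i ∈ l, (PySem.Str.pyGet? str i).isSome) :
    l.foldl (maxSubStrStepA str) st
      = (l.filterMap (fun i => PySem.Str.pyGet? str i)).foldl stepA' st := by
  induction l generalizing st with
  | nil => rfl
  | cons i t ih =>
    have hi := h i (by simp)
    obtain ⟨c, hc⟩ := Option.isSome_iff_exists.mp hi
    have hc' : PySem.List.pyGet? str.toList i = some c := by simpa using hc
    have hstep : maxSubStrStepA str st i = stepA' st c := by
      simp [maxSubStrStepA, stepA', hc']
    simp only [List.foldl_cons, List.filterMap_cons, hc]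
    rw [hstep]
    exact ih _ (fun j hj => h j (by simp [hj]))

-- A's three counters project onto stepD's (balance, count) pair.
lemma foldA'_stepD (cs : List Char) : ∀ (c0 c1 cnt d : Int), d = c0 - c1 →
    (cs.foldl stepA' (c0, c1, cnt)).1 - (cs.foldl stepA' (c0, c1, cnt)).2.1
        = (cs.foldl stepD (d, cnt)).1
    ∧ (cs.foldl stepA' (c0, c1, cnt)).2.2 = (cs.foldl stepD (d, cnt)).2 := by
  induction cs with
  | nil => intro c0 c1 cnt d h; simpa using by omega
  | cons c t ih =>
    intro c0 c1 cnt d h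
    by_cases hc : c = '0'
    · by_cases hz : c0 + 1 = c1
      · have hA : stepA' (c0, c1, cnt) c = (c0 + 1, c1, cnt + 1) := by
          simp [stepA', hc, hz]
        have hD : stepD (d, cnt) c = (d + 1, cnt + 1) := by
          have h0 : d + 1 = 0 := by omega
          simp [stepD, hc, h0]
        rw [List.foldl_cons, List.foldl_cons, hA, hD]
        exact ih (c0 + 1) c1 (cnt + 1) (d + 1) (by omega)
      · have hA : stepA' (c0, c1, cnt) c = (c0 + 1, c1, cnt) := by
          simp [stepA', hc, hz]
        have hD : stepD (d, cnt) c = (d + 1, cnt) := by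
          have h0 : ¬ d + 1 = 0 := by omega
          simp [stepD, hc, h0]
        rw [List.foldl_cons, List.foldl_cons, hA, hD]
        exact ih (c0 + 1) c1 cnt (d + 1) (by omega)
    · by_cases hz : c0 = c1 + 1
      · have hA : stepA' (c0, c1, cnt) c = (c0, c1 + 1, cnt + 1) := by
          simp [stepA', hc, hz]
        have hD : stepD (d, cnt) c = (d + -1, cnt + 1) := by
          have h0 : d + -1 = 0 := by omega
          simp [stepD, hc, h0]
        rw [List.foldl_cons, List.foldl_cons, hA, hD]
        exact ih c0 (c1 + 1) (cnt + 1) (d + -1) (by omega)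
      · have hA : stepA' (c0, c1, cnt) c = (c0, c1 + 1, cnt) := by
          simp [stepA', hc]
          intro hz'; omega
        have hD : stepD (d, cnt) c = (d + -1, cnt) := by
          have h0 : ¬ d + -1 = 0 := by omega
          simp [stepD, hc, h0]
        rw [List.foldl_cons, List.foldl_cons, hA, hD]
        exact ih c0 (c1 + 1) cnt (d + -1) (by omega)

-- No balanced prefix: the zero-hit count never moves and a nonempty list ends unbalanced.
lemma findBal_none_fold (cs : List Char) : ∀ (bal cnt : Int), findBal cs bal = none →
    (cs.foldl stepD (bal, cnt)).2 = cnt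
    ∧ (cs ≠ [] → (cs.foldl stepD (bal, cnt)).1 ≠ 0) := by
  induction cs with
  | nil => intro bal cnt _; simp
  | cons c t ih =>
    intro bal cnt h
    simp only [findBal] at h
    by_cases hb : bal + (if c = '0' then 1 else -1) = 0
    · rw [if_pos hb] at h; cases h
    · rw [if_neg hb] at h
      have hnone : findBal t (bal + (if c = '0' then 1 else -1)) = none :=
        Option.map_eq_none_iff.mp h
      have hstep : stepD (bal, cnt) c = (bal + (if c = '0' then 1 else -1), cnt) := by
        simp [stepD, hb]
      simp only [List.foldl_cons, hstep]
      refine ⟨(ih _ cnt hnone).1, fun _ => ?_⟩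
      by_cases ht : t = []
      · subst ht; simpa using hb
      · exact (ih _ cnt hnone).2 ht

-- Shortest balanced prefix of length k: the fold restarts at balance 0 after drop k,
-- with one more zero hit.
lemma findBal_some_fold (cs : List Char) : ∀ (bal cnt : Int) (k : Nat),
    findBal cs bal = some k →
    cs.foldl stepD (bal, cnt) = (cs.drop k).foldl stepD (0, cnt + 1) := by
  induction cs with
  | nil => intro bal cnt k h; simp [findBal] at h
  | cons c t ih =>
    intro bal cnt k h
    simp only [findBal] at h
    by_cases hb : bal + (if c = '0' then 1 else -1) = 0
    · rw [if_pos hb] at h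
      cases h
      simp only [List.foldl_cons, List.drop_succ_cons, List.drop_zero]
      congr 1
      simp [stepD, hb]
    · rw [if_neg hb] at h
      cases hf : findBal t (bal + (if c = '0' then 1 else -1)) with
      | none => rw [hf] at h; simp at h
      | some k' =>
        rw [hf] at h
        simp only [Option.map_some, Option.some.injEq] at h
        subst h
        simp only [List.foldl_cons, List.drop_succ_cons]
        have hstep : stepD (bal, cnt) c = (bal + (if c = '0' then 1 else -1), cnt) := by
          simp [stepD, hb]
        rw [hstep, ih _ cnt k' hf]

-- The abstracted single pass equals B's greedy chunking.
lemma fold_eq_chunkLoop : ∀ (N : Nat) (cs : List Char), cs.length ≤ N → ∀ (cnt : Int),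
    (if (cs.foldl stepD (0, cnt)).1 ≠ 0 then (-1 : Int) else (cs.foldl stepD (0, cnt)).2)
      = chunkLoop cs cnt := by
  intro N
  induction N with
  | zero =>
    intro cs h cnt
    have hcs : cs = [] := List.eq_nil_of_length_eq_zero (Nat.le_zero.mp h)
    subst hcs
    simp [chunkLoop]
  | succ N ih =>
    intro cs hlen cnt
    by_cases hcs : cs = []
    · subst hcs; simp [chunkLoop]
    · rw [chunkLoop, if_neg hcs]
      cases hf : findBal cs 0 with
      | none =>
        obtain ⟨h2, h1⟩ := findBal_none_fold cs 0 cnt hf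
        rw [if_pos (h1 hcs)]
      | some k =>
        have hb := findBal_bounds hf
        have hl : 0 < cs.length := List.length_pos_iff.mpr hcs
        rw [findBal_some_fold cs 0 cnt k hf]
        exact ih (cs.drop k) (by simp only [List.length_drop]; omega) (cnt + 1)

-- ===== VERDICT (by name: the statement is the Claim_ definition above) =====
theorem maxSubStr_spec : Claim_equal_maxSubStr := by
  intro str n _ hpre
  simp only [Spec_maxSubStr, maxSubStr, maxSubStr_alt]
  unfold Pre_maxSubStr at hpre
  have hall : ∀ i ∈ PySem.List.pyRange 0 n 1, (PySem.Str.pyGet? str i).isSome := by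
    intro i hi
    rw [PySem.List.mem_pyRange_one] at hi
    have hlen : PySem.Str.len str = (str.toList.length : Int) := by simp
    simp only [PySem.Str.pyGet?_eq, PySem.Chars.pyGet?_eq_listPyGet?]
    rw [Option.isSome_iff_ne_none]
    intro hn
    rw [PySem.List.pyGet?_eq_none_iff] at hn
    exact hn (by unfold PySem.Raise.InRange; omega)
  rw [foldA_filterMap str _ _ hall]
  obtain ⟨h1, h2⟩ :=
    foldA'_stepD ((PySem.List.pyRange 0 n 1).filterMap (fun i => PySem.Str.pyGet? str i))
      0 0 0 0 (by ring)
  rw [← fold_eq_chunkLoop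
        ((PySem.List.pyRange 0 n 1).filterMap (fun i => PySem.Str.pyGet? str i)).length
        _ le_rfl 0]
  split_ifs with ha hd <;> omega
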